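-- pv_equiv track=rewrite | github.com/CannyLab/vdtk | vdtk/metrics/distribution/scorer.py | _iterate_partitions
-- ===== SOURCE A (Python) =====
-- from typing import (Any, Dict, Generator, List, Mapping, Optional, Sequence,
--                     Tuple, TypeVar)
--
-- def _iterate_partitions(
--     data: Sequence[str], partition_a_len: Optional[int] = None, partition_b_len: Optional[int] = None
-- ) -> Generator[Tuple[List[str], List[str]], None, None]:
--     for i in range(2 ** (len(data)) - 1):
--         binary_string = f"{i:0{len(data)}b}"
--         partition_a = [data[i] for i in range(len(data)) if binary_string[i] == "1"]
--         partition_b = [data[i] for i in range(len(data)) if binary_string[i] == "0"]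
--         if len(partition_a) > 0 and len(partition_b) > 0:
--             if partition_a_len is not None and len(partition_a) != partition_a_len:
--                 continue
--             if partition_b_len is not None and len(partition_b) != partition_b_len:
--                 continue
--             yield partition_a, partition_b
-- ===== SOURCE B (Python) =====
-- def _iterate_partitions(data, partition_a_len=None, partition_b_len=None):
--     # Structural recursion over the sequence instead of enumerating binary strings:
--     # assignments(i) yields every (a, b) two-colouring of data[i:], first element's
--     # "0" (goes to b) branch first, which reproduces the ascending-integer order.
--     def assignments(i):
--         if i == len(data):
--             yield [], []
--         else:
--             x = data[i]
--             for a, b in assignments(i + 1):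
--                 yield a, [x] + b
--             for a, b in assignments(i + 1):
--                 yield [x] + a, b
--
--     for a, b in assignments(0):
--         if a and b \
--            and (partition_a_len is None or len(a) == partition_a_len) \
--            and (partition_b_len is None or len(b) == partition_b_len):
--             yield a, b
-- ===== Notes on version B (the rewrite author's own statement) =====
-- stated objective: alternative
-- what changed: Replaces the count-to-2^n loop with per-index binary string formatting and two index-comprehension scans by a structural recursion over the sequence that builds both partitions of every assignment directly, then filters; no binary strings or index arithmetic.
import Mathlib
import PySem

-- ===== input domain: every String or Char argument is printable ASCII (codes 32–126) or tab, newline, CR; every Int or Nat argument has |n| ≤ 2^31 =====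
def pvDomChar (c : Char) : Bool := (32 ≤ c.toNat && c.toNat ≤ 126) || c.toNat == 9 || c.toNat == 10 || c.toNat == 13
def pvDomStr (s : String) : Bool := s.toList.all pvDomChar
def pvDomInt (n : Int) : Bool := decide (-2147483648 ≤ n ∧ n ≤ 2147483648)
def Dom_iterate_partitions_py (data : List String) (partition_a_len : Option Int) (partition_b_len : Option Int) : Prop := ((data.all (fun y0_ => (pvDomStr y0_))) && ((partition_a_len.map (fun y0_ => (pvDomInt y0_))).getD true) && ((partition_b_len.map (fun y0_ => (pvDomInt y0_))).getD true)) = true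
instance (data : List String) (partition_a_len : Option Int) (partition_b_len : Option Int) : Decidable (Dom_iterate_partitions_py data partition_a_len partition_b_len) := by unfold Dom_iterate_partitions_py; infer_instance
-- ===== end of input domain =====

-- B replaces A's count-to-2^n loop with binary-string formatting by a structural
-- recursion over the sequence building all (a,b) assignments directly; alternative
-- decomposition of the same O(n*2^n) enumeration, same values in the same order.


-- ===== PORT A =====
-- hand port of Python's f"{i:b}" (binary digits, MSB first, empty only for 0)
def pvBits : Nat → List Char
  | 0 => []
  | (n+1) => pvBits ((n+1)/2) ++ [if (n+1) % 2 = 1 then '1' else '0']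
decreasing_by exact Nat.div_lt_self (Nat.succ_pos n) (by norm_num)

-- hand port of f"{i:0{width}b}": binary digits of i ("0" for 0) left-padded with
-- '0' to at least `width`; exact for all i, width ≥ 0 (width is a minimum in Python)
def pvBinStr (width i : Nat) : List Char :=
  let d := if i = 0 then ['0'] else pvBits i
  List.replicate (width - d.length) '0' ++ d

-- the comprehension [data[j] for j in range(len(data)) if binary_string[j] == c];
-- all indices are in range, so getD is exact
def pvPartOf (data : List String) (bs : List Char) (c : Char) : List String :=
  ((List.range data.length).filter (fun j => bs.getD j ' ' == c)).map (fun j => data.getD j "")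

def iterate_partitions_py (data : List String) (partition_a_len : Option Int) (partition_b_len : Option Int) : List (List String × List String) :=
  (List.range (2 ^ data.length - 1)).foldl (fun acc i =>
    let bs := pvBinStr data.length i
    let pa := pvPartOf data bs '1'
    let pb := pvPartOf data bs '0'
    if pa.length > 0 && pb.length > 0 then
      if (match partition_a_len with | some l => (pa.length : Int) != l | none => false) then acc
      else if (match partition_b_len with | some l => (pb.length : Int) != l | none => false) then acc
      else acc ++ [(pa, pb)]
    else acc) []

-- ===== PORT B =====
-- assignments(i) of Source B: all two-colourings of the suffix, "goes to b" branch first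
def pvAssignments : List String → List (List String × List String)
  | [] => [([], [])]
  | x :: rest =>
      (pvAssignments rest).map (fun p => (p.1, x :: p.2)) ++
      (pvAssignments rest).map (fun p => (x :: p.1, p.2))

def iterate_partitions_py_alt (data : List String) (partition_a_len : Option Int) (partition_b_len : Option Int) : List (List String × List String) :=
  (pvAssignments data).filter (fun p =>
    !p.1.isEmpty && !p.2.isEmpty &&
    (match partition_a_len with | some l => (p.1.length : Int) == l | none => true) &&
    (match partition_b_len with | some l => (p.2.length : Int) == l | none => true))

-- ===== PRECONDITION & SPEC =====
def Spec_iterate_partitions_py (data : List String) (partition_a_len : Option Int) (partition_b_len : Option Int) (out : List (List String × List String)) : Prop := out = iterate_partitions_py_alt data partition_a_len partition_b_len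
instance (data : List String) (partition_a_len : Option Int) (partition_b_len : Option Int) (out : List (List String × List String)) : Decidable (Spec_iterate_partitions_py data partition_a_len partition_b_len out) := by unfold Spec_iterate_partitions_py; infer_instance

-- ===== CLAIM (what is proved, stated in full; the proofs are below) =====
def Claim_equal_iterate_partitions_py : Prop := ∀ (data : List String) (partition_a_len : Option Int) (partition_b_len : Option Int), Dom_iterate_partitions_py data partition_a_len partition_b_len → Spec_iterate_partitions_py data partition_a_len partition_b_len (iterate_partitions_py data partition_a_len partition_b_len)

-- ===== LEMMAS AND PROOFS =====

-- fixed-width big-endian binary expansion (the specification of pvBinStr on i < 2^n)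
def pvBitsPad : Nat → Nat → List Char
  | 0, _ => []
  | (n+1), i => (if i / 2^n % 2 = 1 then '1' else '0') :: pvBitsPad n (i % 2^n)

theorem pvBitsPad_length (n i : Nat) : (pvBitsPad n i).length = n := by
  induction n generalizing i with
  | zero => rfl
  | succ n ih => simp [pvBitsPad, ih]

theorem pvBitsPad_snoc (n i : Nat) :
    pvBitsPad (n+1) i = pvBitsPad n (i / 2) ++ [if i % 2 = 1 then '1' else '0'] := by
  induction n generalizing i with
  | zero => simp [pvBitsPad]
  | succ n ih =>
    show (if i / 2^(n+1) % 2 = 1 then '1' else '0') :: pvBitsPad (n+1) (i % 2^(n+1)) = _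
    rw [ih (i % 2^(n+1))]
    have h1 : i / 2 / 2^n = i / 2^(n+1) := by
      rw [Nat.div_div_eq_div_mul]; ring_nf
    have h2 : i % 2^(n+1) / 2 = i / 2 % 2^n := by
      have he : 2^(n+1) = 2 * 2^n := by ring
      rw [he, Nat.mod_mul_right_div_self]
    have h3 : i % 2^(n+1) % 2 = i % 2 := by
      have : (2:Nat) ∣ 2^(n+1) := dvd_pow_self 2 (Nat.succ_ne_zero n)
      exact Nat.mod_mod_of_dvd i this
    rw [← h1, h2, h3]
    rfl

theorem pvBits_eq (n : Nat) : ∀ i, 2^n ≤ i → i < 2^(n+1) → pvBits i = pvBitsPad (n+1) i := by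
  induction n with
  | zero =>
    intro i h1 h2
    have : i = 1 := by omega
    subst this
    rw [pvBits, pvBits]
    simp [pvBitsPad]
  | succ n ih =>
    intro i h1 h2
    obtain ⟨m, rfl⟩ : ∃ m, i = m + 1 := ⟨i - 1, by have := Nat.one_le_two_pow (n := n+1); omega⟩
    rw [pvBits, pvBitsPad_snoc]
    congr 1
    apply ih
    · have : 2^(n+1) = 2 * 2^n := by ring
      omega
    · have : 2^(n+2) = 2 * 2^(n+1) := by ring
      omega

theorem pvBitsPad_zero_eq (n : Nat) : pvBitsPad n 0 = List.replicate n '0' := by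
  induction n with
  | zero => rfl
  | succ n ih => simp [pvBitsPad, ih, List.replicate_succ]

theorem pvBitsPad_pad (n k i : Nat) (hk : k ≤ n) (hi : i < 2^k) :
    pvBitsPad n i = List.replicate (n - k) '0' ++ pvBitsPad k i := by
  induction n with
  | zero => simp [Nat.le_zero.mp hk]
  | succ n ih =>
    rcases Nat.eq_or_lt_of_le hk with h | h
    · subst h; simp
    · have hk' : k ≤ n := by omega
      have hlt : i < 2^n := hi.trans_le (Nat.pow_le_pow_right (by norm_num) hk')
      show (if i / 2^n % 2 = 1 then '1' else '0') :: pvBitsPad n (i % 2^n) = _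
      rw [Nat.div_eq_of_lt hlt, Nat.mod_eq_of_lt hlt]
      simp only [Nat.zero_mod]
      rw [ih hk']
      have : n + 1 - k = (n - k) + 1 := by omega
      rw [this, List.replicate_succ]
      simp

theorem pvBinStr_eq (n i : Nat) (hn : 1 ≤ n) (hi : i < 2^n) :
    pvBinStr n i = pvBitsPad n i := by
  by_cases h0 : i = 0
  · subst h0
    show List.replicate (n - 1) '0' ++ ['0'] = pvBitsPad n 0
    rw [pvBitsPad_zero_eq]
    have h : n = (n - 1) + 1 := by omega
    rw [h, List.replicate_succ']
    simp
  · unfold pvBinStr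
    simp only [h0, if_false]
    have hi0 : 0 < i := Nat.pos_of_ne_zero h0
    -- find the exact bit-length of i
    obtain ⟨k, hk1, hk2⟩ : ∃ k, 2^k ≤ i ∧ i < 2^(k+1) :=
      ⟨Nat.log2 i, Nat.log2_self_le h0, Nat.lt_log2_self⟩
    have hkn : k + 1 ≤ n := by
      by_contra hc
      have : n ≤ k := by omega
      exact absurd (hi.trans_le (Nat.pow_le_pow_right (by norm_num) this)) (by omega)
    rw [pvBits_eq k i hk1 hk2, pvBitsPad_length]
    exact (pvBitsPad_pad n (k+1) i hkn hk2).symm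

theorem pvPartOf_cons (x : String) (rest : List String) (b : Char) (bs : List Char) (c : Char) :
    pvPartOf (x :: rest) (b :: bs) c =
      (if b == c then [x] else []) ++ pvPartOf rest bs c := by
  unfold pvPartOf
  simp only [List.length_cons, List.range_succ_eq_map, List.filter_cons, List.filter_map,
    List.map_map, List.map_cons, List.getD_cons_zero, List.getD_cons_succ, Function.comp_def]
  by_cases h : b == c <;> simp [h]

theorem pvBitsPad_lo (n i : Nat) (h : i < 2^n) :
    pvBitsPad (n+1) i = '0' :: pvBitsPad n i := by
  show (if i / 2^n % 2 = 1 then '1' else '0') :: pvBitsPad n (i % 2^n) = _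
  rw [Nat.div_eq_of_lt h, Nat.mod_eq_of_lt h]
  simp

theorem pvBitsPad_hi (n i : Nat) (h : i < 2^n) :
    pvBitsPad (n+1) (2^n + i) = '1' :: pvBitsPad n i := by
  show (if (2^n + i) / 2^n % 2 = 1 then '1' else '0') :: pvBitsPad n ((2^n + i) % 2^n) = _
  have h1 : (2^n + i) / 2^n = 1 := by
    rw [Nat.add_comm, Nat.add_div_right _ (by positivity), Nat.div_eq_of_lt h]
  have h2 : (2^n + i) % 2^n = i := by
    rw [Nat.add_mod_left, Nat.mod_eq_of_lt h]
  rw [h1, h2]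
  simp

def pvPair (data : List String) (bs : List Char) : List String × List String :=
  (pvPartOf data bs '1', pvPartOf data bs '0')

theorem pvMap_bitsPad (data : List String) :
    (List.range (2 ^ data.length)).map (fun i => pvPair data (pvBitsPad data.length i)) =
      pvAssignments data := by
  induction data with
  | nil => decide
  | cons x rest ih =>
    have hsplit : 2 ^ (x :: rest).length = 2 ^ rest.length + 2 ^ rest.length := by
      simp [List.length_cons, pow_succ]; ring
    rw [hsplit, List.range_add, List.map_append, List.map_map]
    show _ = (pvAssignments rest).map (fun p => (p.1, x :: p.2)) ++
             (pvAssignments rest).map (fun p => (x :: p.1, p.2))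
    congr 1
    · rw [← ih, List.map_map]
      apply List.map_congr_left
      intro i hi
      have hi' : i < 2 ^ rest.length := List.mem_range.mp hi
      simp only [Function.comp_def, List.length_cons]
      rw [pvBitsPad_lo rest.length i hi']
      simp [pvPair, pvPartOf_cons]
    · rw [← ih, List.map_map]
      apply List.map_congr_left
      intro i hi
      have hi' : i < 2 ^ rest.length := List.mem_range.mp hi
      simp only [Function.comp_def, List.length_cons]
      rw [pvBitsPad_hi rest.length i hi']
      simp [pvPair, pvPartOf_cons]

-- the keep-condition of B as a named predicate
def pvKeep (pa pb : Option Int) (p : List String × List String) : Bool :=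
  !p.1.isEmpty && !p.2.isEmpty &&
  (match pa with | some l => (p.1.length : Int) == l | none => true) &&
  (match pb with | some l => (p.2.length : Int) == l | none => true)

theorem pvBody_eq (pa pb : Option Int) (acc : List (List String × List String))
    (p : List String × List String) :
    (if p.1.length > 0 && p.2.length > 0 then
      if (match pa with | some l => (p.1.length : Int) != l | none => false) then acc
      else if (match pb with | some l => (p.2.length : Int) != l | none => false) then acc
      else acc ++ [(p.1, p.2)]
    else acc) = (if pvKeep pa pb p then acc ++ [p] else acc) := by
  obtain ⟨a, b⟩ := p
  cases pa <;> cases pb <;>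
    simp only [pvKeep, bne_iff_ne, ne_eq] <;>
    by_cases ha : a = [] <;> by_cases hb : b = [] <;>
    simp_all [List.isEmpty_iff, List.length_pos_iff] <;>
    split_ifs <;> simp_all

theorem pvFold_filter (pa pb : Option Int) (f : Nat → List String × List String) :
    ∀ (l : List Nat) (acc : List (List String × List String)),
    l.foldl (fun acc i =>
      (if (f i).1.length > 0 && (f i).2.length > 0 then
        if (match pa with | some len => ((f i).1.length : Int) != len | none => false) then acc
        else if (match pb with | some len => ((f i).2.length : Int) != len | none => false) then acc
        else acc ++ [((f i).1, (f i).2)]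
      else acc)) acc = acc ++ (l.map f).filter (pvKeep pa pb) := by
  intro l
  induction l with
  | nil => simp
  | cons y ys ih =>
    intro acc
    simp only [List.foldl_cons, List.map_cons, List.filter_cons]
    rw [pvBody_eq pa pb acc (f y), ih]
    by_cases h : pvKeep pa pb (f y) <;> simp [h]

theorem pvBitsPad_ones (n : Nat) : pvBitsPad n (2^n - 1) = List.replicate n '1' := by
  induction n with
  | zero => rfl
  | succ n ih =>
    have h : 2^(n+1) - 1 = 2^n + (2^n - 1) := by
      have : 1 ≤ 2^n := Nat.one_le_two_pow
      have : 2^(n+1) = 2^n + 2^n := by ring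
      omega
    rw [h, pvBitsPad_hi n _ (by have : 1 ≤ 2^n := Nat.one_le_two_pow; omega), ih,
      List.replicate_succ]

theorem pvPartOf_ones_zero (data : List String) :
    pvPartOf data (List.replicate data.length '1') '0' = [] := by
  unfold pvPartOf
  rw [List.filter_eq_nil_iff.mpr, List.map_nil]
  intro j hj
  have hj' : j < data.length := List.mem_range.mp hj
  rw [List.getD_eq_getElem?_getD, List.getElem?_replicate]
  simp [hj']

-- ===== VERDICT (by name: the statement is the Claim_ definition above) =====
theorem iterate_partitions_py_spec : Claim_equal_iterate_partitions_py := by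
  unfold Claim_equal_iterate_partitions_py
  intro data pa pb _
  unfold Spec_iterate_partitions_py
  have hf := pvFold_filter pa pb (fun i => pvPair data (pvBinStr data.length i))
    (List.range (2 ^ data.length - 1)) []
  have hA : iterate_partitions_py data pa pb =
      ((List.range (2 ^ data.length - 1)).map
        (fun i => pvPair data (pvBinStr data.length i))).filter (pvKeep pa pb) := hf
  rw [hA]
  unfold iterate_partitions_py_alt
  have halt : (pvAssignments data).filter (fun p =>
      !p.1.isEmpty && !p.2.isEmpty &&
      (match pa with | some l => (p.1.length : Int) == l | none => true) &&
      (match pb with | some l => (p.2.length : Int) == l | none => true)) =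
      (pvAssignments data).filter (pvKeep pa pb) := by
    apply List.filter_congr
    intro p _
    rfl
  rw [halt]
  cases data with
  | nil => simp [pvAssignments, pvKeep]
  | cons x rest =>
    set n := (x :: rest).length with hn
    have hn1 : 1 ≤ n := by simp [hn]
    have hpos : 1 ≤ 2 ^ n := Nat.one_le_two_pow
    have hmap : (List.range (2 ^ n - 1)).map (fun i => pvPair (x :: rest) (pvBinStr n i)) =
        (List.range (2 ^ n - 1)).map (fun i => pvPair (x :: rest) (pvBitsPad n i)) := by
      apply List.map_congr_left
      intro i hi
      have : i < 2 ^ n := by have := List.mem_range.mp hi; omega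
      rw [pvBinStr_eq n i hn1 this]
    rw [hmap]
    have hr : List.range (2 ^ n) = List.range (2 ^ n - 1) ++ [2 ^ n - 1] := by
      have h : 2 ^ n = (2 ^ n - 1) + 1 := by omega
      rw [h]
      simp [List.range_succ]
    have hlast : pvKeep pa pb (pvPair (x :: rest) (pvBitsPad n (2 ^ n - 1))) = false := by
      have hb : (pvPair (x :: rest) (pvBitsPad n (2 ^ n - 1))).2 = [] := by
        show pvPartOf (x :: rest) (pvBitsPad n (2 ^ n - 1)) '0' = []
        rw [pvBitsPad_ones]
        exact pvPartOf_ones_zero (x :: rest)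
      unfold pvKeep
      rw [hb]
      simp
    have hM := pvMap_bitsPad (x :: rest)
    rw [hr, List.map_append, List.map_singleton] at hM
    calc ((List.range (2 ^ n - 1)).map (fun i => pvPair (x :: rest) (pvBitsPad n i))).filter (pvKeep pa pb)
        = (((List.range (2 ^ n - 1)).map (fun i => pvPair (x :: rest) (pvBitsPad n i))).filter (pvKeep pa pb)) ++ ([pvPair (x :: rest) (pvBitsPad n (2 ^ n - 1))].filter (pvKeep pa pb)) := by
          simp [List.filter_cons, hlast]
      _ = (pvAssignments (x :: rest)).filter (pvKeep pa pb) := by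
          rw [← List.filter_append, hM]
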